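-- pv_equiv track=rewrite | github.com/NewAcropolis/frontend | app/clients/api_client.py | get_events_intro_courses_prioritised
-- ===== SOURCE A (Python) =====
-- def get_events_intro_courses_prioritised(events):
--     intro_courses_first = []
--     other_events = []
--     for event in events:
--         if event['event_type'] == 'Introductory Course':
--             intro_courses_first.append(event)
--         else:
--             other_events.append(event)
--
--     intro_courses_first.extend(other_events)
--     return intro_courses_first
-- ===== SOURCE B (Python) =====
-- def get_events_intro_courses_prioritised(events):
--     return sorted(events, key=lambda event: event['event_type'] != 'Introductory Course')
-- ===== Notes on version B (the rewrite author's own statement) =====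
-- stated objective: idiomatic
-- what changed: Replaces the two-bucket partition loop with a single stable sorted() call keyed on the boolean 'not an Introductory Course', so intro courses sort first and stability preserves the original relative order in each group.
import Mathlib
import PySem

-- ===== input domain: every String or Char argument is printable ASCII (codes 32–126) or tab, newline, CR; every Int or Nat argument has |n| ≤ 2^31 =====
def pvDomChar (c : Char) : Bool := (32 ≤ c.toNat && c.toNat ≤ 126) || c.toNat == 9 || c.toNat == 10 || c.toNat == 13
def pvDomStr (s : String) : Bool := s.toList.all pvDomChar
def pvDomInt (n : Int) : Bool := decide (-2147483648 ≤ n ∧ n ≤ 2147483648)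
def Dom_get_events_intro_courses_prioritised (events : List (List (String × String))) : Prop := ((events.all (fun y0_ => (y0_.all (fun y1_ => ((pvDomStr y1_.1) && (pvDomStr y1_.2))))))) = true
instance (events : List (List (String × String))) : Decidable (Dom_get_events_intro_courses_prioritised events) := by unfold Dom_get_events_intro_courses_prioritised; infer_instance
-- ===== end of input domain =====

-- B replaces A's two-bucket partition loop by one stable sort on the boolean key
-- "event_type != 'Introductory Course'" (idiomatic; same return value, no mutation).


-- event['event_type'] — first-match dict lookup; exact where the key is present (Pre_ excludes a missing key, on which Python raises KeyError)
def pvEventType (event : List (String × String)) : String :=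
  (PySem.Dict.mk event).getD "event_type" ""

-- ===== PORT A =====
def get_events_intro_courses_prioritised (events : List (List (String × String))) : List (List (String × String)) :=
  let p := events.foldl
    (fun (acc : List (List (String × String)) × List (List (String × String))) event =>
      if pvEventType event = "Introductory Course"
      then (acc.1 ++ [event], acc.2)
      else (acc.1, acc.2 ++ [event]))
    ([], [])
  p.1 ++ p.2

-- ===== PORT B =====
def get_events_intro_courses_prioritised_alt (events : List (List (String × String))) : List (List (String × String)) :=
  PySem.List.sorted events (fun event => pvEventType event != "Introductory Course") false

-- ===== PRECONDITION & SPEC =====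
-- Pre_ excludes exactly the inputs where some event lacks the 'event_type' key: there both Pythons raise KeyError.
def Pre_get_events_intro_courses_prioritised (events : List (List (String × String))) : Prop :=
  (events.all (fun event => event.any (fun kv => kv.1 == "event_type"))) = true
instance (events : List (List (String × String))) : Decidable (Pre_get_events_intro_courses_prioritised events) := by unfold Pre_get_events_intro_courses_prioritised; infer_instance

def pvWitness_get_events_intro_courses_prioritised : (List (List (String × String))) :=
  [[("event_type", "Talk")], [("event_type", "Introductory Course")]]

def Spec_get_events_intro_courses_prioritised (events : List (List (String × String))) (out : List (List (String × String))) : Prop := out = get_events_intro_courses_prioritised_alt events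
instance (events : List (List (String × String))) (out : List (List (String × String))) : Decidable (Spec_get_events_intro_courses_prioritised events out) := by unfold Spec_get_events_intro_courses_prioritised; infer_instance

-- ===== CLAIM (what is proved, stated in full; the proofs are below) =====
def Claim_equal_get_events_intro_courses_prioritised : Prop := ∀ (events : List (List (String × String))), Dom_get_events_intro_courses_prioritised events → Pre_get_events_intro_courses_prioritised events → Spec_get_events_intro_courses_prioritised events (get_events_intro_courses_prioritised events)

-- ===== LEMMAS AND PROOFS =====

-- A's second bucket: the branch-swapped form of PySem.List.foldl_append_ite_eq_filter.
theorem pv_foldl_skip_eq_filter {α : Type} (P : α → Prop) [DecidablePred P]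
    (l : List α) (acc : List α) :
    l.foldl (fun acc e => if P e then acc else acc ++ [e]) acc
      = acc ++ l.filter (fun e => ¬ P e) := by
  induction l generalizing acc with
  | nil => simp
  | cons x xs ih =>
    by_cases h : P x <;> simp [h, ih]

-- Stable insertion into a block of false-keys followed by a block of true-keys.
theorem pv_insertBy_two {α : Type} (key : α → Bool) (x : α) :
    ∀ (I O : List α), (∀ a ∈ I, key a = false) → (∀ a ∈ O, key a = true) →
    PySem.List.insertBy (fun a b => decide (key a < key b)) x (I ++ O)
      = if key x then I ++ O ++ [x] else I ++ [x] ++ O := by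
  intro I O hI hO
  induction I with
  | nil =>
    induction O with
    | nil => cases hx : key x <;> simp [PySem.List.insertBy]
    | cons o os iho =>
      have ho : key o = true := hO o (by simp)
      have iho' := iho (fun a ha => hO a (by simp [ha]))
      cases hx : key x with
      | false => simp [PySem.List.insertBy, hx, ho]
      | true =>
        simp only [hx, if_pos] at iho'
        simp only [List.nil_append] at iho' ⊢
        simp [PySem.List.insertBy, hx, ho, iho']
  | cons i is ihI =>
    have hi : key i = false := hI i (by simp)
    have ihI' := ihI (fun a ha => hI a (by simp [ha]))
    have hlt : decide (key x < key i) = false := by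
      rw [hi]; cases key x <;> decide
    cases hx : key x with
    | false =>
      simp only [hx, if_neg Bool.false_ne_true] at ihI' ⊢
      simp [PySem.List.insertBy, hlt, ihI']
    | true =>
      simp only [hx, if_pos] at ihI' ⊢
      simp [PySem.List.insertBy, hlt, ihI']

-- The stable insertion sort on a two-valued Bool key is exactly the partition.
theorem pv_sorted_two {α : Type} (key : α → Bool) :
    ∀ (xs I O : List α), (∀ a ∈ I, key a = false) → (∀ a ∈ O, key a = true) →
    xs.foldl (fun acc x => PySem.List.insertBy (fun a b => decide (key a < key b)) x acc) (I ++ O)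
      = (I ++ xs.filter (fun a => !(key a))) ++ (O ++ xs.filter key) := by
  intro xs
  induction xs with
  | nil => intro I O _ _; simp
  | cons x xs ih =>
    intro I O hI hO
    rw [List.foldl_cons, pv_insertBy_two key x I O hI hO]
    cases hx : key x with
    | false =>
      have h := ih (I ++ [x]) O
        (by intro a ha; rcases List.mem_append.mp ha with h | h
            · exact hI a h
            · simp at h; subst h; exact hx) hO
      simp only [if_neg Bool.false_ne_true]
      rw [show I ++ [x] ++ O = (I ++ [x]) ++ O by simp] at h ⊢
      rw [h]
      simp [hx]
    | true =>
      have h := ih I (O ++ [x]) hI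
        (by intro a ha; rcases List.mem_append.mp ha with h | h
            · exact hO a h
            · simp at h; subst h; exact hx)
      simp only [if_pos]
      rw [show I ++ O ++ [x] = I ++ (O ++ [x]) by simp, h]
      simp [hx]

theorem pv_A_eq_partition (events : List (List (String × String))) :
    get_events_intro_courses_prioritised events
      = events.filter (fun e => pvEventType e = "Introductory Course")
        ++ events.filter (fun e => ¬ pvEventType e = "Introductory Course") := by
  simp only [get_events_intro_courses_prioritised]
  have hfun : (fun (acc : List (List (String × String)) × List (List (String × String))) event =>
      if pvEventType event = "Introductory Course"
      then (acc.1 ++ [event], acc.2)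
      else (acc.1, acc.2 ++ [event]))
    = (fun s e =>
      (if pvEventType e = "Introductory Course" then s.1 ++ [e] else s.1,
       if pvEventType e = "Introductory Course" then s.2 else s.2 ++ [e])) := by
    funext s e; by_cases h : pvEventType e = "Introductory Course" <;> simp [h]
  rw [hfun, PySem.List.foldl_prod_mk
    (f := fun acc e => if pvEventType e = "Introductory Course" then acc ++ [e] else acc)
    (g := fun acc e => if pvEventType e = "Introductory Course" then acc else acc ++ [e])]
  rw [PySem.List.foldl_append_ite_eq_filter, pv_foldl_skip_eq_filter]
  simp

-- ===== VERDICT (by name: the statement is the Claim_ definition above) =====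
theorem get_events_intro_courses_prioritised_spec : Claim_equal_get_events_intro_courses_prioritised := by
  intro events _ _
  unfold Spec_get_events_intro_courses_prioritised get_events_intro_courses_prioritised_alt
  rw [pv_A_eq_partition]
  unfold PySem.List.sorted
  simp only [Bool.false_eq_true, if_false]
  rw [show (events.foldl (fun acc x =>
        PySem.List.insertBy (fun a b =>
          decide ((pvEventType a != "Introductory Course") < (pvEventType b != "Introductory Course"))) x acc) [])
      = events.foldl (fun acc x =>
        PySem.List.insertBy (fun a b =>
          decide ((fun e => pvEventType e != "Introductory Course") a <
                  (fun e => pvEventType e != "Introductory Course") b)) x acc) ([] ++ []) from rfl]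
  rw [pv_sorted_two (fun e => pvEventType e != "Introductory Course") events [] []
      (by intro a h; simp at h) (by intro a h; simp at h)]
  simp only [List.nil_append]
  congr 1 <;> apply List.filter_congr <;> intro a _ <;>
    by_cases h : pvEventType a = "Introductory Course" <;> simp [h]
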